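-- pv_equiv track=rewrite | github.com/wuziqiqiqi/PD | clease/settings/concentration.py | _get_integers
-- ===== SOURCE A (Python) =====
-- def _get_integers(string, variable_range=None):
--     """Extract all the integers from a string."""
--     # pylint: disable=no-self-use,too-many-branches
--     if variable_range is None:
--         variable_symbols = []
--     else:
--         variable_symbols = list(variable_range.keys())
--     signs = {"+": 1, "-": -1}
--     integers = []
--     current_indx = 0
--     sum_of_variable_coeff = {k: 0 for k in variable_symbols}
--     active_sign = 1
--     while current_indx < len(string):
--         connected_to_symbol = False
--         if string[current_indx] in signs:
--             active_sign = signs[string[current_indx]]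
--         elif string[current_indx] == "<":
--             active_sign = 1
--
--         if string[current_indx].isdigit():
--             substr = string[current_indx]
--             # find how many consecutive digits are there
--             indx = current_indx + 1
--             while indx < len(string):
--                 # end of integer found
--                 if not string[indx].isdigit():
--                     # case where integer followed by a variable symbol
--                     # (e.g., 4x)
--                     if string[indx] in variable_symbols:
--                         connected_to_symbol = True
--                     break
--                 substr += string[indx]
--                 indx += 1
--
--             # got an integer number
--             if not connected_to_symbol:
--                 integers.append(int(substr))
--                 current_indx = indx
--             else:
--                 symbol = string[indx]
--                 sum_of_variable_coeff[symbol] += active_sign * int(substr)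
--                 current_indx = indx + 1
--
--         # case where variable symbol is defined without integer
--         elif string[current_indx] in variable_symbols:
--             symbol = string[current_indx]
--             sum_of_variable_coeff[symbol] += active_sign
--             current_indx += 1
--         else:
--             current_indx += 1
--
--     # Ensure valid chemical formula
--     for _, value in sum_of_variable_coeff.items():
--         if value != 0:
--             raise ValueError(f"Invalid formula! {string} {sum_of_variable_coeff}")
--     return integers
-- ===== SOURCE B (Python) =====
-- import re
--
-- _TOKEN_RE = re.compile(r"\d+|[\s\S]")
--
--
-- def _get_integers(string, variable_range=None):
--     """Extract all the integers from a string."""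
--     if variable_range is None:
--         variable_symbols = []
--     else:
--         variable_symbols = list(variable_range.keys())
--     integers = []
--     coeff = {k: 0 for k in variable_symbols}
--     # tokenize: maximal digit runs, else single characters (incl. newlines)
--     tokens = _TOKEN_RE.findall(string)
--     sign = 1
--     i = 0
--     n = len(tokens)
--     while i < n:
--         t = tokens[i]
--         if t.isdigit():
--             if i + 1 < n and tokens[i + 1] in variable_symbols:
--                 # number directly attached to a variable symbol, e.g. "4x"
--                 coeff[tokens[i + 1]] += sign * int(t)
--                 i += 2
--             else:
--                 integers.append(int(t))
--                 i += 1
--         else: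
--             if t == "+":
--                 sign = 1
--             elif t == "-":
--                 sign = -1
--             elif t == "<":
--                 sign = 1
--             if t in variable_symbols:
--                 coeff[t] += sign
--             i += 1
--     for _, value in coeff.items():
--         if value != 0:
--             raise ValueError(f"Invalid formula! {string} {coeff}")
--     return integers
-- ===== Notes on version B (the rewrite author's own statement) =====
-- stated objective: idiomatic
-- what changed: B first tokenizes the string with a single regex (maximal digit runs vs single characters) and then runs one flat token loop with one-token lookahead, replacing A's index-driven character scan with its hand-written nested digit-collecting while loop; the zero-coefficient validation and ValueError are kept identical.
import Mathlib
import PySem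

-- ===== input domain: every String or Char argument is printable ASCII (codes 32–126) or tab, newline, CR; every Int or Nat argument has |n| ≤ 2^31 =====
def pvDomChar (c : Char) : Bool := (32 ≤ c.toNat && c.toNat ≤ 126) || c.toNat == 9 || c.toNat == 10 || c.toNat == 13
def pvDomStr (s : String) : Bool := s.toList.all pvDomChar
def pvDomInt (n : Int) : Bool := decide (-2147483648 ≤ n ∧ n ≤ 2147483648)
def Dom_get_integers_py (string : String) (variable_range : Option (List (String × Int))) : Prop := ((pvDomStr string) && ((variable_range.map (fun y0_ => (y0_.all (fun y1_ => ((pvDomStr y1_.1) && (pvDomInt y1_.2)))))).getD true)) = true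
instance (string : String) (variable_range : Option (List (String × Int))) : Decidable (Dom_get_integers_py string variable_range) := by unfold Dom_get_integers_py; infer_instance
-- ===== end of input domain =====

-- B replaces A's index-driven character scan (with a nested digit-collecting while loop) by a
-- regex-style tokenization into maximal digit runs / single characters followed by one flat token
-- loop with one-token lookahead; objective: a more idiomatic decomposition, same cost.
-- Both Pythons raise ValueError when a variable-coefficient sum is nonzero; Pre_ excludes exactly
-- those inputs, and the ports return the integer list.


-- ===== PORT A =====
-- shared by both ports and Pre_: variable_symbols = list(variable_range.keys()) (dict keys: ordered dedup)
def pvSymbols (variable_range : Option (List (String × Int))) : List String :=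
  match variable_range with
  | none => []
  | some l => (PySem.Dict.ofList l).keys

-- shared: {k: 0 for k in variable_symbols}
def pvInitCoeff (symbols : List String) : PySem.Dict String Int :=
  symbols.foldl (fun d k => d.insert k 0) PySem.Dict.empty

-- shared: int(substr) for a nonempty list of ASCII digits (exact there)
def pvDigitsVal (cs : List Char) : Int :=
  cs.foldl (fun a c => 10 * a + ((c.toNat : Int) - 48)) 0

-- A's inner while loop: collect the consecutive digits, return (run, rest)
def pvTakeDigits : List Char → List Char × List Char
  | [] => ([], [])
  | c :: rest =>
    if PySem.Chars.isdigit c then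
      let p := pvTakeDigits rest
      (c :: p.1, p.2)
    else ([], c :: rest)

lemma pvTakeDigits_snd_length (l : List Char) : (pvTakeDigits l).2.length ≤ l.length := by
  induction l with
  | nil => simp [pvTakeDigits]
  | cons c rest ih =>
    by_cases h : PySem.Chars.isdigit c <;> simp [pvTakeDigits, h] <;> omega

-- A's outer while loop, step for step (the coefficient dict is threaded exactly as in A;
-- its final zero check is the ValueError excluded by Pre_)
def pvLoopA (symbols : List String) (cs : List Char) (sign : Int)
    (coeff : PySem.Dict String Int) (ints : List Int) : List Int :=
  match cs with
  | [] => ints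
  | c :: rest =>
    let sign1 : Int := if c = '+' then 1 else if c = '-' then -1 else if c = '<' then 1 else sign
    if PySem.Chars.isdigit c then
      let p := pvTakeDigits rest
      match h : p.2 with
      | [] => pvLoopA symbols [] sign1 coeff (ints ++ [pvDigitsVal (c :: p.1)])
      | d :: rest2 =>
        if String.mk [d] ∈ symbols then
          pvLoopA symbols rest2 sign1
            (coeff.modify (String.mk [d]) 0 (· + sign1 * pvDigitsVal (c :: p.1))) ints
        else
          pvLoopA symbols (d :: rest2) sign1 coeff (ints ++ [pvDigitsVal (c :: p.1)])
    else if String.mk [c] ∈ symbols then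
      pvLoopA symbols rest sign1 (coeff.modify (String.mk [c]) 0 (· + sign1)) ints
    else
      pvLoopA symbols rest sign1 coeff ints
termination_by cs.length
decreasing_by
  · simp
  · have := pvTakeDigits_snd_length rest
    rw [h] at this; simp at this ⊢; omega
  · have := pvTakeDigits_snd_length rest
    rw [h] at this; simp at this ⊢; omega
  · simp
  · simp

def get_integers_py (string : String) (variable_range : Option (List (String × Int))) : List Int :=
  let symbols := pvSymbols variable_range
  pvLoopA symbols string.toList 1 (pvInitCoeff symbols) []

-- ===== PORT B =====
-- re.findall(r"\d+|[\s\S]", string): maximal digit runs, otherwise single characters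
def pvTokenize : List Char → List (List Char)
  | [] => []
  | c :: rest =>
    if PySem.Chars.isdigit c then
      (c :: rest.takeWhile PySem.Chars.isdigit) :: pvTokenize (rest.dropWhile PySem.Chars.isdigit)
    else
      [c] :: pvTokenize rest
termination_by cs => cs.length
decreasing_by
  · have := List.length_dropWhile_le (p := PySem.Chars.isdigit) (l := rest)
    simp; omega
  · simp

-- B's flat token loop with one-token lookahead
def pvLoopB (symbols : List String) (toks : List (List Char)) (sign : Int)
    (coeff : PySem.Dict String Int) (ints : List Int) : List Int :=
  match toks with
  | [] => ints
  | t :: rest =>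
    if PySem.Chars.strIsdigit t then
      match rest with
      | u :: rest2 =>
        if String.mk u ∈ symbols then
          pvLoopB symbols rest2 sign
            (coeff.modify (String.mk u) 0 (· + sign * pvDigitsVal t)) ints
        else
          pvLoopB symbols (u :: rest2) sign coeff (ints ++ [pvDigitsVal t])
      | [] => ints ++ [pvDigitsVal t]
    else
      let sign1 : Int := if t = ['+'] then 1 else if t = ['-'] then -1 else if t = ['<'] then 1 else sign
      if String.mk t ∈ symbols then
        pvLoopB symbols rest sign1 (coeff.modify (String.mk t) 0 (· + sign1)) ints
      else
        pvLoopB symbols rest sign1 coeff ints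
termination_by toks.length
decreasing_by all_goals simp

def get_integers_py_alt (string : String) (variable_range : Option (List (String × Int))) : List Int :=
  let symbols := pvSymbols variable_range
  pvLoopB symbols (pvTokenize string.toList) 1 (pvInitCoeff symbols) []

-- ===== PRECONDITION & SPEC =====
-- Coefficient sums by an independent one-pass state machine (not by either port): `run` carries the
-- value of the digit run currently open; a run immediately followed by a symbol is consumed into its
-- coefficient, otherwise the run was a plain integer and the character is processed normally.
def pvPreStep (symbols : List String) (st : Int × Option Int × PySem.Dict String Int) (c : Char) :
    Int × Option Int × PySem.Dict String Int :=
  match st with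
  | (sign, run, coeff) =>
    if PySem.Chars.isdigit c then
      (sign, some (10 * run.getD 0 + ((c.toNat : Int) - 48)), coeff)
    else if run.isSome && symbols.contains (String.ofList [c]) then
      (sign, none, coeff.modify (String.ofList [c]) 0 (· + sign * run.getD 0))
    else
      let sign1 : Int := if c = '+' then 1 else if c = '-' then -1 else if c = '<' then 1 else sign
      (sign1, none,
        if symbols.contains (String.ofList [c]) then
          coeff.modify (String.ofList [c]) 0 (· + sign1)
        else coeff)

-- Pre_ excludes exactly the inputs on which the Python raises ValueError: some variable-coefficient sum ≠ 0
def Pre_get_integers_py (string : String) (variable_range : Option (List (String × Int))) : Prop :=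
  (((string.toList.foldl (pvPreStep (pvSymbols variable_range))
      (1, none, pvInitCoeff (pvSymbols variable_range))).2.2).values.all (· = 0)) = true
instance (string : String) (variable_range : Option (List (String × Int))) : Decidable (Pre_get_integers_py string variable_range) := by unfold Pre_get_integers_py; infer_instance

def pvWitness_get_integers_py : String × (Option (List (String × Int))) :=
  ("x<3<2-x", some [("x", 0)])

def Spec_get_integers_py (string : String) (variable_range : Option (List (String × Int))) (out : List Int) : Prop := out = get_integers_py_alt string variable_range
instance (string : String) (variable_range : Option (List (String × Int))) (out : List Int) : Decidable (Spec_get_integers_py string variable_range out) := by unfold Spec_get_integers_py; infer_instance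

-- ===== CLAIM (what is proved, stated in full; the proofs are below) =====
def Claim_equal_get_integers_py : Prop := ∀ (string : String) (variable_range : Option (List (String × Int))), Dom_get_integers_py string variable_range → Pre_get_integers_py string variable_range → Spec_get_integers_py string variable_range (get_integers_py string variable_range)

-- ===== LEMMAS AND PROOFS =====

lemma pvTakeDigits_eq (l : List Char) :
    pvTakeDigits l = (l.takeWhile PySem.Chars.isdigit, l.dropWhile PySem.Chars.isdigit) := by
  induction l with
  | nil => simp [pvTakeDigits]
  | cons c rest ih =>
    by_cases h : PySem.Chars.isdigit c <;> simp [pvTakeDigits, h, ih]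

lemma pvDigit_not_sign {c : Char} (hc : PySem.Chars.isdigit c = true) :
    c ≠ '+' ∧ c ≠ '-' ∧ c ≠ '<' := by
  refine ⟨?_, ?_, ?_⟩ <;> rintro rfl <;> simp [PySem.Chars.isdigit] at hc

lemma pvSign1_of_digit {c : Char} (hc : PySem.Chars.isdigit c = true) (sign : Int) :
    (if c = '+' then (1 : Int) else if c = '-' then -1 else if c = '<' then 1 else sign) = sign := by
  obtain ⟨h1, h2, h3⟩ := pvDigit_not_sign hc
  simp [h1, h2, h3]

-- ----- case equations for A's loop -----
lemma pvLoopA_nil (symbols : List String) (sign : Int) (coeff : PySem.Dict String Int)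
    (ints : List Int) : pvLoopA symbols [] sign coeff ints = ints := by
  rw [pvLoopA.eq_def]

lemma pvLoopA_digit_end {c : Char} {rest : List Char} (hc : PySem.Chars.isdigit c = true)
    (hdrop : rest.dropWhile PySem.Chars.isdigit = [])
    (symbols : List String) (sign : Int) (coeff : PySem.Dict String Int) (ints : List Int) :
    pvLoopA symbols (c :: rest) sign coeff ints =
      ints ++ [pvDigitsVal (c :: rest.takeWhile PySem.Chars.isdigit)] := by
  rw [pvLoopA.eq_def]
  simp only [hc, if_true]
  split
  next heq => rw [pvTakeDigits_eq] at heq ⊢; simp [pvLoopA_nil]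
  next d' rest2' heq => rw [pvTakeDigits_eq] at heq; simp only at heq; rw [hdrop] at heq; simp at heq

lemma pvLoopA_digit_cons {c : Char} {rest : List Char} {d : Char} {rest2 : List Char}
    (hc : PySem.Chars.isdigit c = true)
    (hdrop : rest.dropWhile PySem.Chars.isdigit = d :: rest2)
    (symbols : List String) (sign : Int) (coeff : PySem.Dict String Int) (ints : List Int) :
    pvLoopA symbols (c :: rest) sign coeff ints =
      (if String.mk [d] ∈ symbols then
        pvLoopA symbols rest2 sign
          (coeff.modify (String.mk [d]) 0 (· + sign * pvDigitsVal (c :: rest.takeWhile PySem.Chars.isdigit))) ints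
      else
        pvLoopA symbols (d :: rest2) sign coeff
          (ints ++ [pvDigitsVal (c :: rest.takeWhile PySem.Chars.isdigit)])) := by
  rw [pvLoopA.eq_def]
  simp only [hc, if_true]
  split
  next heq => rw [pvTakeDigits_eq] at heq; simp only at heq; rw [hdrop] at heq; simp at heq
  next d' rest2' heq =>
    rw [pvTakeDigits_eq] at heq ⊢; simp only at heq ⊢
    rw [hdrop] at heq
    obtain ⟨rfl, rfl⟩ : d = d' ∧ rest2 = rest2' := by simpa using heq
    rw [pvSign1_of_digit hc]

lemma pvLoopA_char {c : Char} {rest : List Char} (hc : PySem.Chars.isdigit c = false)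
    (symbols : List String) (sign : Int) (coeff : PySem.Dict String Int) (ints : List Int) :
    pvLoopA symbols (c :: rest) sign coeff ints =
      (if String.mk [c] ∈ symbols then
        pvLoopA symbols rest
          (if c = '+' then 1 else if c = '-' then -1 else if c = '<' then 1 else sign)
          (coeff.modify (String.mk [c]) 0
            (· + (if c = '+' then 1 else if c = '-' then -1 else if c = '<' then 1 else sign))) ints
      else
        pvLoopA symbols rest
          (if c = '+' then 1 else if c = '-' then -1 else if c = '<' then 1 else sign) coeff ints) := by
  rw [pvLoopA.eq_def]
  simp only [hc, Bool.false_eq_true, if_false]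

-- ----- case equations for B's loop -----
lemma pvLoopB_nil (symbols : List String) (sign : Int) (coeff : PySem.Dict String Int)
    (ints : List Int) : pvLoopB symbols [] sign coeff ints = ints := by
  rw [pvLoopB.eq_def]

lemma pvLoopB_digit_end {t : List Char} (ht : PySem.Chars.strIsdigit t = true)
    (symbols : List String) (sign : Int) (coeff : PySem.Dict String Int) (ints : List Int) :
    pvLoopB symbols [t] sign coeff ints = ints ++ [pvDigitsVal t] := by
  rw [pvLoopB.eq_def]; simp only [ht, if_true]

lemma pvLoopB_digit_cons {t u : List Char} (ht : PySem.Chars.strIsdigit t = true)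
    (toks : List (List Char))
    (symbols : List String) (sign : Int) (coeff : PySem.Dict String Int) (ints : List Int) :
    pvLoopB symbols (t :: u :: toks) sign coeff ints =
      (if String.mk u ∈ symbols then
        pvLoopB symbols toks sign (coeff.modify (String.mk u) 0 (· + sign * pvDigitsVal t)) ints
      else
        pvLoopB symbols (u :: toks) sign coeff (ints ++ [pvDigitsVal t])) := by
  rw [pvLoopB.eq_def]; simp only [ht, if_true]

lemma pvLoopB_char {t : List Char} (ht : PySem.Chars.strIsdigit t = false)
    (toks : List (List Char))
    (symbols : List String) (sign : Int) (coeff : PySem.Dict String Int) (ints : List Int) :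
    pvLoopB symbols (t :: toks) sign coeff ints =
      (if String.mk t ∈ symbols then
        pvLoopB symbols toks
          (if t = ['+'] then 1 else if t = ['-'] then -1 else if t = ['<'] then 1 else sign)
          (coeff.modify (String.mk t) 0
            (· + (if t = ['+'] then 1 else if t = ['-'] then -1 else if t = ['<'] then 1 else sign))) ints
      else
        pvLoopB symbols toks
          (if t = ['+'] then 1 else if t = ['-'] then -1 else if t = ['<'] then 1 else sign) coeff ints) := by
  rw [pvLoopB.eq_def]; simp only [ht, Bool.false_eq_true, if_false]

-- ----- tokenizer equations -----
lemma pvTokenize_digit {c : Char} (rest : List Char) (hc : PySem.Chars.isdigit c = true) :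
    pvTokenize (c :: rest) =
      (c :: rest.takeWhile PySem.Chars.isdigit) :: pvTokenize (rest.dropWhile PySem.Chars.isdigit) := by
  rw [pvTokenize]; simp [hc]

lemma pvTokenize_char {c : Char} (rest : List Char) (hc : PySem.Chars.isdigit c = false) :
    pvTokenize (c :: rest) = [c] :: pvTokenize rest := by
  rw [pvTokenize]; simp [hc]

lemma pvStrIsdigit_run {c : Char} (run : List Char) (hc : PySem.Chars.isdigit c = true)
    (hrun : ∀ x ∈ run, PySem.Chars.isdigit x = true) :
    PySem.Chars.strIsdigit (c :: run) = true := by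
  simp only [PySem.Chars.strIsdigit]
  simp [hc]
  exact hrun

lemma pvStrIsdigit_single {c : Char} (hc : PySem.Chars.isdigit c = false) :
    PySem.Chars.strIsdigit [c] = false := by
  simp [PySem.Chars.strIsdigit, hc]

-- main loop equivalence: A's character scan equals B's token loop (for any two dict states,
-- since the returned integer list never reads the coefficient dict)
lemma pvLoopA_eq_loopB (symbols : List String) :
    ∀ (n : Nat) (cs : List Char), cs.length ≤ n →
      ∀ (sign : Int) (c1 c2 : PySem.Dict String Int) (ints : List Int),
        pvLoopA symbols cs sign c1 ints = pvLoopB symbols (pvTokenize cs) sign c2 ints := by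
  intro n
  induction n with
  | zero =>
    intro cs hlen sign c1 c2 ints
    have : cs = [] := by cases cs <;> simp_all
    subst this
    simp [pvLoopA_nil, pvLoopB_nil, pvTokenize]
  | succ n ih =>
    intro cs hlen sign c1 c2 ints
    match cs with
    | [] => simp [pvLoopA_nil, pvLoopB_nil, pvTokenize]
    | c :: rest =>
      simp only [List.length_cons] at hlen
      by_cases hc : PySem.Chars.isdigit c
      · -- digit run
        have hdig : PySem.Chars.strIsdigit (c :: rest.takeWhile PySem.Chars.isdigit) = true :=
          pvStrIsdigit_run _ hc (fun x hx => List.mem_takeWhile_imp hx)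
        rw [pvTokenize_digit rest hc]
        match hdrop : rest.dropWhile PySem.Chars.isdigit with
        | [] =>
          rw [pvLoopA_digit_end hc hdrop]
          simp only [pvTokenize]
          rw [pvLoopB_digit_end hdig]
        | d :: rest2 =>
          have hd : PySem.Chars.isdigit d = false := by
            have := List.head?_dropWhile_not PySem.Chars.isdigit rest
            rw [hdrop] at this; simpa using this
          have hdl : rest2.length + 1 ≤ rest.length := by
            have h1 := List.length_dropWhile_le (p := PySem.Chars.isdigit) (l := rest)
            rw [hdrop] at h1; simpa using h1
          have hlen2 : rest2.length ≤ n := by omega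
          rw [pvLoopA_digit_cons hc hdrop, pvTokenize_char rest2 hd,
            pvLoopB_digit_cons hdig]
          by_cases hmem : String.mk [d] ∈ symbols
          · simp only [hmem, if_true]
            exact ih rest2 hlen2 _ _ _ _
          · simp only [hmem, if_false]
            rw [ih (d :: rest2) (by simp only [List.length_cons]; omega) _ _ c2 _,
              pvTokenize_char rest2 hd]
      · -- single character
        have hc' : PySem.Chars.isdigit c = false := by simpa using hc
        have hlen2 : rest.length ≤ n := by omega
        rw [pvTokenize_char rest hc', pvLoopA_char hc',
          pvLoopB_char (pvStrIsdigit_single hc')]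
        have hplus : (([c] : List Char) = ['+']) = (c = '+') := by simp
        have hminus : (([c] : List Char) = ['-']) = (c = '-') := by simp
        have hlt : (([c] : List Char) = ['<']) = (c = '<') := by simp
        simp only [hplus, hminus, hlt]
        by_cases hmem : String.mk [c] ∈ symbols
        · simp only [hmem, if_true]
          exact ih rest hlen2 _ _ _ _
        · simp only [hmem, if_false]
          exact ih rest hlen2 _ _ _ _

-- ===== VERDICT (by name: the statement is the Claim_ definition above) =====
theorem get_integers_py_spec : Claim_equal_get_integers_py := by
  intro string variable_range _hdom _hpre
  unfold Spec_get_integers_py get_integers_py get_integers_py_alt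
  exact pvLoopA_eq_loopB _ string.toList.length string.toList le_rfl 1 _ _ []
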